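-- pv_equiv track=rewrite | github.com/rahulsingh237/python | mockvita 2 (tcs).py | od
-- ===== SOURCE A (Python) =====
-- def od(v):
--     q=0
--     for i in range(1,len(v),2):
--         for j in range(3,len(v),2):
--             if(i!=j):
--                 if(v[i]==v[j]):
--                     q=q+1
--     return(q)
-- ===== SOURCE B (Python) =====
-- def od(v):
--     a = {}
--     for i in range(1, len(v), 2):
--         c = v[i]
--         a[c] = a.get(c, 0) + 1
--     b = {}
--     for j in range(3, len(v), 2):
--         c = v[j]
--         b[c] = b.get(c, 0) + 1
--     return sum(a.get(c, 0) * k - k for c, k in b.items())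
-- ===== Notes on version B (the rewrite author's own statement) =====
-- stated objective: faster
-- what changed: Replaced A's quadratic double loop over odd index pairs by two single-pass frequency dictionaries (odd indices from 1 and from 3) and the closed-form sum a[c]*b[c] - b[c] over the second dictionary's items.
import Mathlib
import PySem

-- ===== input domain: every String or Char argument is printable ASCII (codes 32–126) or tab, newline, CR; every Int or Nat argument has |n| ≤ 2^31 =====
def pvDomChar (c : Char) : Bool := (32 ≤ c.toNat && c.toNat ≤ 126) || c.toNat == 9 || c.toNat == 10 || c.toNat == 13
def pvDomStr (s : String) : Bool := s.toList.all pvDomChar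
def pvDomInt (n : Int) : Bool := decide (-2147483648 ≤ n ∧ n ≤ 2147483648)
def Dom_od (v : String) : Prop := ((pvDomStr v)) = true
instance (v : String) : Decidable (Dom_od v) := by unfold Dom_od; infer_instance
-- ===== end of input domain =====

-- B replaces A's quadratic double loop over odd-index pairs by two single-pass
-- frequency dictionaries and the sum a[c]*k - k over the second one's items (objective: faster).

-- ===== PORT A =====
def od (v : String) : Int :=
  (PySem.List.pyRange 1 (PySem.Str.len v) 2).foldl (fun q i =>
    (PySem.List.pyRange 3 (PySem.Str.len v) 2).foldl (fun q j =>
      if i ≠ j then (if PySem.Str.pyGet? v i = PySem.Str.pyGet? v j then q + 1 else q) else q) q) 0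

-- ===== PORT B =====
def od_alt (v : String) : Int :=
  let a := (PySem.List.pyRange 1 (PySem.Str.len v) 2).foldl
    (fun d i => let c := PySem.Str.pyGet? v i; d.insert c (d.getD c 0 + 1))
    (PySem.Dict.empty : PySem.Dict (Option Char) Int)
  let b := (PySem.List.pyRange 3 (PySem.Str.len v) 2).foldl
    (fun d j => let c := PySem.Str.pyGet? v j; d.insert c (d.getD c 0 + 1))
    (PySem.Dict.empty : PySem.Dict (Option Char) Int)
  (b.items.map (fun p => a.getD p.1 0 * p.2 - p.2)).sum

-- ===== PRECONDITION & SPEC =====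
def Spec_od (v : String) (out : Int) : Prop := out = od_alt v
instance (v : String) (out : Int) : Decidable (Spec_od v out) := by unfold Spec_od; infer_instance

-- ===== CLAIM (what is proved, stated in full; the proofs are below) =====
def Claim_equal_od : Prop := ∀ (v : String), Dom_od v → Spec_od v (od v)

-- ===== LEMMAS AND PROOFS =====

theorem pv_pyRange_two_nil (a b : Int) (h : b ≤ a) : PySem.List.pyRange a b 2 = [] := by
  rw [PySem.List.pyRange_of_pos a b (by norm_num)]
  simp [not_lt.2 h]

theorem pv_pyRange_two_cons (a b : Int) (h : a < b) :
    PySem.List.pyRange a b 2 = a :: PySem.List.pyRange (a + 2) b 2 := by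
  rw [PySem.List.pyRange_of_pos a b (by norm_num),
      PySem.List.pyRange_of_pos (a + 2) b (by norm_num)]
  by_cases h2 : a + 2 < b
  · have hc : ((b - a + 2 - 1) / 2).toNat = ((b - (a + 2) + 2 - 1) / 2).toNat + 1 := by omega
    rw [if_pos h, if_pos h2, hc, List.range_succ_eq_map]
    simp only [List.map_cons, List.map_map]
    refine List.cons_eq_cons.2 ⟨by push_cast; ring, ?_⟩
    refine List.map_congr_left (fun k _ => ?_)
    simp only [Function.comp, Nat.succ_eq_add_one]
    push_cast; ring
  · have hc : ((b - a + 2 - 1) / 2).toNat = 1 := by omega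
    rw [if_pos h, if_neg h2, hc]
    simp

theorem pv_nodup_pyRange_two (a b : Int) : (PySem.List.pyRange a b 2).Nodup := by
  rw [PySem.List.pyRange_of_pos a b (by norm_num)]
  refine List.Nodup.map ?_ (List.nodup_range)
  intro x y hxy
  have : a + 2 * (x:Int) = a + 2 * (y:Int) := hxy
  omega

theorem pv_sum_ind_mem (l R : List Int) (h : ∀ x ∈ l, x ∈ R) :
    (l.map (fun i => if i ∈ R then (1:Int) else 0)).sum = l.length := by
  rw [List.map_congr_left (fun a ha => if_pos (h a ha)), PySem.List.sum_map_const_int]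
  ring

theorem pv_sum_map_sub {α : Type} (l : List α) (f h : α → Int) :
    (l.map (fun x => f x - h x)).sum = (l.map f).sum - (l.map h).sum := by
  induction l with
  | nil => simp
  | cons a l ih => simp [ih]; ring

theorem pv_sum_split {α : Type} [DecidableEq α] [BEq α] [LawfulBEq α]
    (g : α → Int) (t : List α) (c : α) :
    (t.map g).sum = g c * ((t.count c : Int)) + ((t.filter (fun x => !(x == c))).map g).sum := by
  induction t with
  | nil => simp
  | cons a t ih =>
    by_cases hac : a = c
    · subst hac
      simp only [List.count_cons_self, List.filter_cons, beq_self_eq_true, Bool.not_true,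
        List.map_cons, List.sum_cons]
      rw [ih]; push_cast; ring
    · have h1 : (a == c) = false := by simp [hac]
      have h2 : (c == a) = false := by simp; exact fun h => hac h.symm
      simp [List.count_cons, h1]
      rw [ih]
      ring

theorem pv_sum_over_nodup {α : Type} [DecidableEq α] [BEq α] [LawfulBEq α]
    (g : α → Int) (u t : List α) (hu : u.Nodup) (ht : ∀ x ∈ t, x ∈ u) :
    (u.map (fun c => g c * (t.count c : Int))).sum = (t.map g).sum := by
  induction u generalizing t with
  | nil =>
    have : t = [] := by
      cases t with
      | nil => rfl
      | cons a t => exact absurd (ht a (by simp)) (by simp)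
    subst this; simp
  | cons c u ih =>
    obtain ⟨hcu, hu'⟩ := List.nodup_cons.1 hu
    have hstep : (u.map (fun c' => g c' * (t.count c' : Int))).sum
        = (u.map (fun c' => g c' * ((t.filter (fun x => !(x == c))).count c' : Int))).sum := by
      refine congrArg List.sum (List.map_congr_left (fun c' hc' => ?_))
      have hcc : c' ≠ c := fun h => hcu (h ▸ hc')
      rw [List.count_filter (by simp [hcc])]
    simp only [List.map_cons, List.sum_cons]
    rw [hstep, ih (t.filter (fun x => !(x == c))) hu' (fun x hx => by
      have hxt := List.mem_of_mem_filter hx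
      have hxc : ¬((x == c) = true) := by simpa using List.of_mem_filter hx
      rcases List.mem_cons.1 (ht x hxt) with h | h
      · exact absurd (by simp [h]) hxc
      · exact h)]
    exact (pv_sum_split g t c).symm

theorem pv_sum_ind_eq {α : Type} [DecidableEq α] [BEq α] [LawfulBEq α] (a : α) (t : List α) :
    (t.map (fun x => if a = x then (1:Int) else 0)).sum = (t.count a : Int) := by
  induction t with
  | nil => simp
  | cons b t iht =>
    simp only [List.map_cons, List.sum_cons, List.count_cons, iht]
    by_cases h : a = b
    · simp [h, add_comm]
    · have hb : (b == a) = false := by simp; exact fun hh => h hh.symm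
      simp [h, hb]

theorem pv_sum_count_comm {α : Type} [DecidableEq α] [BEq α] [LawfulBEq α] (s t : List α) :
    (s.map (fun x => (t.count x : Int))).sum = (t.map (fun x => (s.count x : Int))).sum := by
  induction s with
  | nil => simp
  | cons a s ih =>
    simp only [List.map_cons, List.sum_cons]
    rw [ih]
    have h1 : (t.map (fun x => ((a :: s).count x : Int))).sum
        = (t.map (fun x => (s.count x : Int) + (if a = x then 1 else 0))).sum := by
      refine congrArg List.sum (List.map_congr_left (fun x _ => ?_))
      simp only [List.count_cons]
      by_cases h : a = x
      · simp [h]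
      · have : (a == x) = false := by simp [h]
        simp [this, h]
    rw [h1, PySem.List.sum_map_add_int, pv_sum_ind_eq]
    ring

theorem pv_inner_count {α : Type} [DecidableEq α] [BEq α] [LawfulBEq α]
    (g : Int → α) (i : Int) (R : List Int) (hR : R.Nodup) :
    ((R.countP (fun j => decide (i ≠ j ∧ g i = g j)) : Int))
      = ((R.map g).count (g i) : Int) - (if i ∈ R then 1 else 0) := by
  induction R with
  | nil => simp
  | cons a R ih =>
    obtain ⟨ha, hR'⟩ := List.nodup_cons.1 hR
    rw [List.countP_cons]
    push_cast
    rw [ih hR']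
    simp only [List.map_cons, List.count_cons, List.mem_cons]
    by_cases hia : i = a
    · subst hia
      have h1 : (decide (i ≠ i ∧ g i = g i)) = false := by simp
      have h2 : (g i == g i) = true := by simp
      rw [h1, h2]
      simp [ha]
    · by_cases hg : g i = g a
      · have h1 : (decide (i ≠ a ∧ g i = g a)) = true := by simp [hia, hg]
        have h2 : (g a == g i) = true := by simp [hg.symm]
        rw [h1, h2]
        have hmm : (i = a ∨ i ∈ R) ↔ i ∈ R := by tauto
        simp only [hmm]
        split_ifs <;> push_cast <;> ring
      · have h1 : (decide (i ≠ a ∧ g i = g a)) = false := by simp [hg]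
        have h2 : (g a == g i) = false := by simp; exact fun h => hg h.symm
        rw [h1, h2]
        have hmm : (i = a ∨ i ∈ R) ↔ i ∈ R := by tauto
        simp only [hmm]
        split_ifs <;> push_cast <;> ring

theorem pv_master (n : Int) (g : Int → Option Char) :
    ((PySem.List.pyRange 1 n 2).foldl (fun q i =>
      (PySem.List.pyRange 3 n 2).foldl (fun q j =>
        if i ≠ j then (if g i = g j then q + 1 else q) else q) q) 0)
    = (((PySem.Dict.counter ((PySem.List.pyRange 3 n 2).map g)).items).map
        (fun p => (PySem.Dict.counter ((PySem.List.pyRange 1 n 2).map g)).getD p.1 0 * p.2 - p.2)).sum := by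
  set R1 := PySem.List.pyRange 1 n 2 with hR1
  set R3 := PySem.List.pyRange 3 n 2 with hR3
  have hB : (((PySem.Dict.counter (R3.map g)).items).map
      (fun p => (PySem.Dict.counter (R1.map g)).getD p.1 0 * p.2 - p.2)).sum
      = ((R3.map g).map (fun x => ((R1.map g).count x : Int))).sum - ((R3.map g).length : Int) := by
    rw [PySem.Dict.items_counter, List.map_map]
    have hmapeq : ((PySem.Set.ofList (R3.map g)).map
          ((fun p : (Option Char) × Int => (PySem.Dict.counter (R1.map g)).getD p.1 0 * p.2 - p.2)
            ∘ (fun k => (k, ((R3.map g).count k : Int)))))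
        = ((PySem.Set.ofList (R3.map g)).map
            (fun c => (((R1.map g).count c : Int) - 1) * (((R3.map g).count c : Int)))) := by
      refine List.map_congr_left (fun c _ => ?_)
      simp only [Function.comp]
      rw [PySem.Dict.getD_counter]
      ring
    rw [hmapeq]
    rw [pv_sum_over_nodup _ _ _ (PySem.Set.nodup_ofList _)
      (fun x hx => (PySem.Set.mem_ofList _ x).2 hx)]
    rw [pv_sum_map_sub (R3.map g) (fun x => ((R1.map g).count x : Int)) (fun _ => 1),
      PySem.List.sum_map_const_int]
    ring
  rw [hB]
  have hinnerfun : (fun (q i : Int) =>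
      R3.foldl (fun q j => if i ≠ j then (if g i = g j then q + 1 else q) else q) q)
      = (fun q i => q + ((R3.countP (fun j => decide (i ≠ j ∧ g i = g j)) : Int))) := by
    funext q i
    have hfun : (fun (q : Int) (j : Int) => if i ≠ j then (if g i = g j then q + 1 else q) else q)
        = (fun q j => if i ≠ j ∧ g i = g j then q + 1 else q) := by
      funext q j
      split_ifs <;> first | rfl | tauto
    rw [hfun, PySem.List.foldl_ite_add_one (fun j => i ≠ j ∧ g i = g j) R3 q]
  rw [hinnerfun, PySem.List.foldl_add R1
    (fun i => ((R3.countP (fun j => decide (i ≠ j ∧ g i = g j)) : Int))) 0, zero_add]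
  have hpt : (R1.map (fun i => ((R3.countP (fun j => decide (i ≠ j ∧ g i = g j)) : Int))))
      = (R1.map (fun i => ((R3.map g).count (g i) : Int) - (if i ∈ R3 then 1 else 0))) :=
    List.map_congr_left (fun i _ => pv_inner_count g i R3 (pv_nodup_pyRange_two 3 n))
  rw [hpt, pv_sum_map_sub R1 (fun i => ((R3.map g).count (g i) : Int))
    (fun i => if i ∈ R3 then 1 else 0)]
  have hmap1 : (R1.map (fun i => ((R3.map g).count (g i) : Int)))
      = ((R1.map g).map (fun x => ((R3.map g).count x : Int))) := by
    rw [List.map_map]; rfl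
  rw [hmap1, pv_sum_count_comm (R1.map g) (R3.map g)]
  have hlen : (R1.map (fun i => if i ∈ R3 then (1:Int) else 0)).sum = ((R3.map g).length : Int) := by
    rw [List.length_map]
    by_cases h1n : 1 < n
    · have hcons : R1 = 1 :: R3 := by
        rw [hR1, hR3, pv_pyRange_two_cons 1 n h1n]
        norm_num
      rw [hcons]
      simp only [List.map_cons, List.sum_cons]
      have h1mem : (1:Int) ∉ R3 := by
        intro hmem
        have := (PySem.List.mem_pyRange_iff_of_pos (by norm_num : (0:Int) < 2) 1).1 (hR3 ▸ hmem)
        omega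
      rw [if_neg h1mem, pv_sum_ind_mem R3 R3 (fun x hx => hx)]
      ring
    · have hR1nil : R1 = [] := by rw [hR1]; exact pv_pyRange_two_nil 1 n (by omega)
      have hR3nil : R3 = [] := by rw [hR3]; exact pv_pyRange_two_nil 3 n (by omega)
      rw [hR1nil, hR3nil]
      simp
  rw [hlen]

theorem od_eq_od_alt (v : String) : od v = od_alt v := by
  have hg : ∀ (R : List Int),
      R.foldl (fun d i => let c := PySem.Str.pyGet? v i; d.insert c (d.getD c 0 + 1))
        (PySem.Dict.empty : PySem.Dict (Option Char) Int)
      = PySem.Dict.counter (R.map (fun i => PySem.Str.pyGet? v i)) := by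
    intro R
    rw [← PySem.Dict.foldl_insert_getD_add_one_eq_counter, List.foldl_map]
  unfold od od_alt
  simp only [hg]
  exact pv_master (PySem.Str.len v) (fun i => PySem.Str.pyGet? v i)

-- ===== VERDICT (by name: the statement is the Claim_ definition above) =====
theorem od_spec : Claim_equal_od := by
  intro v _
  unfold Spec_od
  exact od_eq_od_alt v
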